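-- pv_equiv track=rewrite | github.com/K4i04/SWP_Python_Wex | Pokersimulator.py | hasPair
-- ===== SOURCE A (Python) =====
-- def hasPair(hand):
--     value_count = {}
--
--     # Count occurrences of each value in the hand
--     for card in hand:
--         value = card.split()[0]  # Extract the value from the card
--         if value in value_count:
--             value_count[value] += 1
--         else:
--             value_count[value] = 1
--     pairs = 0
--
--     for count in value_count.values():
--         if count == 2:
--             pairs += 1
--
--     return pairs
-- ===== SOURCE B (Python) =====
-- def hasPair(hand):
--     # Sort the extracted values so equal values are adjacent, then count runs of length exactly 2.
--     values = sorted(card.split()[0] for card in hand)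
--     if not values:
--         return 0
--     pairs = 0
--     cur = values[0]
--     run = 1
--     for v in values[1:]:
--         if v == cur:
--             run += 1
--         else:
--             if run == 2:
--                 pairs += 1
--             cur = v
--             run = 1
--     if run == 2:
--         pairs += 1
--     return pairs
-- ===== Notes on version B (the rewrite author's own statement) =====
-- stated objective: alternative
-- what changed: Replaces the hash-counter dictionary with sort-then-scan: extracted values are sorted so equal values become adjacent, and a single run-length walk counts runs of length exactly 2.
import Mathlib
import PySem

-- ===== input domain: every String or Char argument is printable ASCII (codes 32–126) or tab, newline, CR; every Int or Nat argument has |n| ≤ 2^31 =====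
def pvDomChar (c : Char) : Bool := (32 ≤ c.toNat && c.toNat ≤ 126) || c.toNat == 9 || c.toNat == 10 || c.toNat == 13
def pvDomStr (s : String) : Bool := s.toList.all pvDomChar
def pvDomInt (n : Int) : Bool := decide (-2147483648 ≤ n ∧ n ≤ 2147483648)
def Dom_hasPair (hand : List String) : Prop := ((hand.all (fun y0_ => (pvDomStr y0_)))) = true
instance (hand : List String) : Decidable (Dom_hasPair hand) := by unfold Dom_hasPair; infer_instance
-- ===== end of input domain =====

-- B replaces A's hash-counter dictionary with sort-then-scan: sort the extracted values and
-- count runs of length exactly 2 in one walk (an alternative decomposition, not claimed faster).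

-- card.split()[0]; Pre_hasPair guarantees the split is nonempty, so the "" default never occurs there.
def pvVal (card : String) : String := (PySem.List.pyGet? (PySem.Str.split₀ card) 0).getD ""

-- ===== PORT A =====
def hasPair (hand : List String) : Int :=
  let value_count : PySem.Dict String Int :=
    hand.foldl (fun d card =>
      let value := pvVal card
      if d.contains value then d.insert value (d.getD value 0 + 1)
      else d.insert value 1) PySem.Dict.empty
  value_count.values.foldl (fun pairs count => if count == 2 then pairs + 1 else pairs) 0

-- ===== PORT B =====
-- the for-loop over values[1:] with state (pairs, cur, run), including the final run flush
def pvScanB (pairs : Int) (cur : String) (run : Int) : List String → Int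
  | [] => if run == 2 then pairs + 1 else pairs
  | v :: vs =>
    if v == cur then pvScanB pairs cur (run + 1) vs
    else pvScanB (if run == 2 then pairs + 1 else pairs) v 1 vs

def hasPair_alt (hand : List String) : Int :=
  let values := PySem.List.sorted (hand.map pvVal) (fun x => x) false
  match values with
  | [] => 0
  | v :: vs => pvScanB 0 v 1 vs

-- ===== PRECONDITION & SPEC =====
-- Pre_ excludes exactly the hands containing an empty/all-whitespace card:
-- there card.split()[0] raises IndexError in A (and in B alike).
def Pre_hasPair (hand : List String) : Prop := ∀ c ∈ hand, PySem.Str.split₀ c ≠ []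
instance (hand : List String) : Decidable (Pre_hasPair hand) := by unfold Pre_hasPair; infer_instance
def pvWitness_hasPair : List String := ["2 H", "2 S", "5 D"]

def Spec_hasPair (hand : List String) (out : Int) : Prop := out = hasPair_alt hand
instance (hand : List String) (out : Int) : Decidable (Spec_hasPair hand out) := by unfold Spec_hasPair; infer_instance

-- ===== CLAIM (what is proved, stated in full; the proofs are below) =====
def Claim_equal_hasPair : Prop := ∀ (hand : List String), Dom_hasPair hand → Pre_hasPair hand → Spec_hasPair hand (hasPair hand)

-- ===== LEMMAS AND PROOFS =====

def pvF (vals : List String) : Int :=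
  ((vals.toFinset.filter (fun k => vals.count k = 2)).card : Int)

lemma pvA_loop2 (l : List Int) (a : Int) :
    l.foldl (fun pairs count => if count == 2 then pairs + 1 else pairs) a
      = a + (l.countP (fun c => c == 2) : Int) := by
  induction l generalizing a with
  | nil => simp
  | cons x xs ih =>
    simp only [List.foldl_cons, List.countP_cons, ih]
    by_cases h : x == 2
    · simp [h]; ring
    · simp [h]

lemma pvCountP_nodup_eq_card (l : List String) (p : String → Bool) (h : l.Nodup) :
    l.countP p = (l.toFinset.filter (fun k => p k = true)).card := by
  classical
  rw [← List.toFinset_filter, List.toFinset_card_of_nodup (h.filter p)]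
  exact List.countP_eq_length_filter

lemma pvA_dict (hand : List String) :
    hand.foldl (fun d card =>
      let value := pvVal card
      if d.contains value then d.insert value (d.getD value 0 + 1)
      else d.insert value 1) PySem.Dict.empty
    = PySem.Dict.counter (hand.map pvVal) := by
  rw [← PySem.Dict.foldl_insert_getD_add_one_eq_counter, List.foldl_map]
  congr 1
  funext d card
  by_cases h : d.contains (pvVal card)
  · rw [if_pos h]
  · rw [if_neg h]
    congr 1
    rw [PySem.Dict.getD_of_not_contains]
    · norm_num
    · exact eq_false_of_ne_true h

lemma pvA_eq (hand : List String) : hasPair hand = pvF (hand.map pvVal) := by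
  simp only [hasPair]
  rw [pvA_dict]
  have hv : (PySem.Dict.counter (hand.map pvVal)).values
      = (PySem.Set.ofList (hand.map pvVal)).map (fun k => ((hand.map pvVal).count k : Int)) := by
    show ((PySem.Dict.counter (hand.map pvVal)).items).map (·.2) = _
    rw [PySem.Dict.items_counter]
    simp [List.map_map, Function.comp]
  rw [hv, pvA_loop2, List.countP_map]
  have hn : (PySem.Set.ofList (hand.map pvVal) : List String).Nodup := PySem.Set.nodup_ofList _
  rw [pvCountP_nodup_eq_card _ _ hn]
  unfold pvF
  simp only [Function.comp]
  have hts : (PySem.Set.ofList (hand.map pvVal) : List String).toFinset = (hand.map pvVal).toFinset := by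
    apply Finset.ext; intro x
    simp [List.mem_toFinset, PySem.Set.mem_ofList]
  rw [hts]
  have hp : ∀ k : String, ((((hand.map pvVal).count k : Int) == 2) = true) = ((hand.map pvVal).count k = 2) := by
    intro k
    simp only [beq_iff_eq]
    apply propext
    exact ⟨fun hx => by exact_mod_cast hx, fun hx => by exact_mod_cast hx⟩
  simp only [hp]
  ring

lemma pvF_cons (v : String) (vs : List String) :
    pvF (v :: vs) = (if 1 + (vs.count v : Int) = 2 then 1 else 0)
      + (((vs.toFinset.erase v).filter (fun k => vs.count k = 2)).card : Int) := by
  classical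
  unfold pvF
  have h1 : (v :: vs).toFinset = insert v (vs.toFinset.erase v) := by
    apply Finset.ext; intro x
    simp only [List.toFinset_cons, Finset.mem_insert, Finset.mem_erase, List.mem_toFinset]
    constructor
    · rintro (rfl | hx)
      · exact Or.inl rfl
      · by_cases hxv : x = v
        · exact Or.inl hxv
        · exact Or.inr ⟨hxv, hx⟩
    · rintro (rfl | ⟨_, hx⟩)
      · exact Or.inl rfl
      · exact Or.inr hx
  rw [h1, Finset.filter_insert]
  have h2 : ((vs.toFinset.erase v).filter (fun k => (v :: vs).count k = 2))
      = ((vs.toFinset.erase v).filter (fun k => vs.count k = 2)) := by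
    apply Finset.filter_congr
    intro x hx
    rw [List.count_cons_of_ne (Finset.mem_erase.mp hx).1.symm]
  have hvnot : v ∉ (vs.toFinset.erase v).filter (fun k => vs.count k = 2) := by
    intro hmem
    exact (Finset.mem_erase.mp (Finset.mem_filter.mp hmem).1).1 rfl
  have h3 : (v :: vs).count v = vs.count v + 1 := by simp
  by_cases hc : (v :: vs).count v = 2
  · rw [if_pos hc, h2, Finset.card_insert_of_notMem hvnot]
    rw [if_pos (by omega)]
    push_cast
    ring
  · rw [if_neg hc, h2, if_neg (by omega)]
    ring

lemma pvScanB_spec (vs : List String) (cur : String) (run pairs : Int)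
    (h : (cur :: vs).Pairwise (· ≤ ·)) :
    pvScanB pairs cur run vs
      = pairs + (if run + (vs.count cur : Int) = 2 then 1 else 0)
        + (((vs.toFinset.erase cur).filter (fun k => vs.count k = 2)).card : Int) := by
  classical
  induction vs generalizing cur run pairs with
  | nil =>
    simp only [pvScanB, List.count_nil, beq_iff_eq]
    by_cases hr : run = 2
    · rw [if_pos hr, if_pos (by omega)]; simp
    · rw [if_neg hr, if_neg (by omega)]; simp
  | cons y vs ih =>
    obtain ⟨hcur, h2⟩ := List.pairwise_cons.mp h
    by_cases hy : y = cur
    · subst hy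
      rw [show pvScanB pairs y run (y :: vs) = pvScanB pairs y (run + 1) vs by
        simp [pvScanB]]
      rw [ih y (run + 1) pairs h2]
      have hset : ((y :: vs).toFinset.erase y) = vs.toFinset.erase y := by
        apply Finset.ext; intro x
        simp only [List.toFinset_cons, Finset.mem_erase, Finset.mem_insert, List.mem_toFinset]
        constructor
        · rintro ⟨hxy, rfl | hx⟩
          · exact absurd rfl hxy
          · exact ⟨hxy, hx⟩
        · rintro ⟨hxy, hx⟩; exact ⟨hxy, Or.inr hx⟩
      have hpred : ((vs.toFinset.erase y).filter (fun k => (y :: vs).count k = 2))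
          = ((vs.toFinset.erase y).filter (fun k => vs.count k = 2)) := by
        apply Finset.filter_congr
        intro x hx
        rw [List.count_cons_of_ne (Finset.mem_erase.mp hx).1.symm]
      have hcnt : (y :: vs).count y = vs.count y + 1 := by simp
      rw [hset, hpred, hcnt]
      generalize (((vs.toFinset.erase y).filter (fun k => vs.count k = 2)).card : Int) = C
      push_cast
      split_ifs <;> omega
    · have hy' : (y == cur) = false := by simp [hy]
      rw [show pvScanB pairs cur run (y :: vs) =
            pvScanB (if run == 2 then pairs + 1 else pairs) y 1 vs by
        simp [pvScanB, hy']]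
      rw [ih y 1 _ h2]
      have hcy : cur ≤ y := hcur y (by simp)
      have hcurlt : cur ∉ y :: vs := by
        intro hmem
        rcases List.mem_cons.mp hmem with rfl | hmem'
        · exact hy rfl
        · have h1 : y ≤ cur := (List.pairwise_cons.mp h2).1 cur hmem'
          exact hy (le_antisymm h1 hcy)
      have hcount0 : (y :: vs).count cur = 0 := List.count_eq_zero.mpr hcurlt
      have herase : ((y :: vs).toFinset.erase cur) = (y :: vs).toFinset := by
        apply Finset.erase_eq_of_notMem
        simpa [List.mem_toFinset] using hcurlt
      have hcard : ((((y :: vs).toFinset.erase cur).filter (fun k => (y :: vs).count k = 2)).card : Int)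
          = pvF (y :: vs) := by
        rw [herase]; rfl
      rw [hcount0, hcard, pvF_cons]
      simp only [beq_iff_eq]
      generalize (((vs.toFinset.erase y).filter (fun k => vs.count k = 2)).card : Int) = C
      push_cast
      split_ifs <;> omega

lemma pvF_perm (l l' : List String) (hp : l.Perm l') : pvF l = pvF l' := by
  unfold pvF
  have ht : l.toFinset = l'.toFinset := by
    apply Finset.ext; intro x
    simp only [List.mem_toFinset]
    exact ⟨fun hx => hp.mem_iff.mp hx, fun hx => hp.mem_iff.mpr hx⟩
  rw [ht]
  have hf : (l'.toFinset.filter (fun k => l.count k = 2))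
      = (l'.toFinset.filter (fun k => l'.count k = 2)) := by
    apply Finset.filter_congr
    intro x _
    rw [hp.count_eq]
  rw [hf]

lemma pvB_eq (hand : List String) : hasPair_alt hand = pvF (hand.map pvVal) := by
  have hdef : hasPair_alt hand =
      (match PySem.List.sorted (hand.map pvVal) (fun x => x) false with
       | [] => (0 : Int)
       | v :: vs => pvScanB 0 v 1 vs) := rfl
  rw [hdef]
  cases hs : PySem.List.sorted (hand.map pvVal) (fun x => x) false with
  | nil =>
    have h0 : hand.map pvVal = [] := (PySem.List.sorted_eq_nil_iff _ _ _).mp hs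
    rw [h0]
    simp [pvF]
  | cons v vs =>
    have hperm : (v :: vs).Perm (hand.map pvVal) := hs ▸ PySem.List.sorted_perm _ _ _
    have hpw : (v :: vs).Pairwise (· ≤ ·) := by
      have hh := PySem.List.sorted_pairwise (xs := hand.map pvVal) (key := fun x => x)
      rw [hs] at hh
      exact hh
    show pvScanB 0 v 1 vs = pvF (hand.map pvVal)
    rw [pvScanB_spec vs v 1 0 hpw, ← pvF_perm _ _ hperm, pvF_cons]
    ring

-- ===== VERDICT (by name: the statement is the Claim_ definition above) =====
theorem hasPair_spec : Claim_equal_hasPair := by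
  intro hand _ _
  show hasPair hand = hasPair_alt hand
  rw [pvA_eq, pvB_eq]
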